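-- pv_equiv track=rewrite | github.com/starswap/CompetitiveProgramming | ICPC/ECNA/2023/E.py | check
-- ===== SOURCE A (Python) =====
-- def check(s):
--     if s[-1] != "O":
--         return False
--     for j in s:
--         if j not in "EO":
--             return False
--     for i in range(1, len(s)):
--         if s[i] == "O" and s[i-1] == "O":
--             return False
--     return True
-- ===== SOURCE B (Python) =====
-- def check(s):
--     prev = ""
--     for c in s:
--         if c not in "EO" or (c == "O" and prev == "O"):
--             return False
--         prev = c
--     return prev == "O"
-- ===== Notes on version B (the rewrite author's own statement) =====
-- stated objective: simpler
-- what changed: Replaced A's three separate passes (last-char test, membership scan, index-based adjacency scan) by one single pass that tracks the previous character and decides validity on the fly.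
-- outside the precondition, e.g. on check(''): A raises IndexError, B returns False
import Mathlib
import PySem

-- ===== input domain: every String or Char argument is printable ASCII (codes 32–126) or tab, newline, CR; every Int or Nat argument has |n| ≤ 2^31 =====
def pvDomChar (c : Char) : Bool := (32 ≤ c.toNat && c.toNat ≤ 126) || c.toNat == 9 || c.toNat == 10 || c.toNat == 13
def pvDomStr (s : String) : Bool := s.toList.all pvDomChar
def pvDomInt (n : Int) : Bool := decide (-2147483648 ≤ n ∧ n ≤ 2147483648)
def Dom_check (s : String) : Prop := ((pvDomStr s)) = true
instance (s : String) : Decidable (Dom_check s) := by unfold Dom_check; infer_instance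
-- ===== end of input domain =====

-- B is one single pass with a `prev` accumulator instead of A's three passes; return values only
-- (neither program mutates anything).

-- ===== PORT A =====
-- `for j in s: if j not in "EO": return False`  (j is a single char, so membership = char ∈ ['E','O'])
def checkCharsOk : List Char → Bool
  | [] => true
  | j :: rest => if !(j == 'E' || j == 'O') then false else checkCharsOk rest

-- `for i in range(1, len(s)): if s[i] == "O" and s[i-1] == "O": return False`
def checkLoop2 (l : List Char) : List Int → Bool
  | [] => true
  | i :: rest =>
      if PySem.List.pyGet? l i == some 'O' && PySem.List.pyGet? l (i - 1) == some 'O' then false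
      else checkLoop2 l rest

def check (s : String) : Bool :=
  match PySem.List.pyGet? s.toList (-1) with
  | none => false   -- s[-1] raises IndexError on the empty string; excluded by Pre_check
  | some last =>
    if last != 'O' then false
    else if !(checkCharsOk s.toList) then false
    else checkLoop2 s.toList (PySem.List.pyRange 1 (PySem.Str.len s) 1)

-- ===== PORT B =====
-- prev = "" is ported as `none`; prev = c as `some c` (Python's prev is always "" or a 1-char string)
def checkAltLoop (prev : Option Char) : List Char → Bool
  | [] => prev == some 'O'
  | c :: rest =>
      if !(c == 'E' || c == 'O') || (c == 'O' && prev == some 'O') then false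
      else checkAltLoop (some c) rest

def check_alt (s : String) : Bool := checkAltLoop none s.toList

-- ===== PRECONDITION & SPEC =====
-- Pre_ excludes only the empty string, on which A raises IndexError at s[-1].
def Pre_check (s : String) : Prop := s.toList ≠ []
instance (s : String) : Decidable (Pre_check s) := by unfold Pre_check; infer_instance
def pvWitness_check : String := "EOEO"


def Spec_check (s : String) (out : Bool) : Prop := out = check_alt s
instance (s : String) (out : Bool) : Decidable (Spec_check s out) := by unfold Spec_check; infer_instance

-- ===== CLAIM (what is proved, stated in full; the proofs are below) =====
def Claim_equal_check : Prop := ∀ (s : String), Dom_check s → Pre_check s → Spec_check s (check s)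

-- ===== LEMMAS AND PROOFS =====

-- the adjacency relation: no two consecutive 'O'
def ROk (a b : Char) : Prop := ¬(a = 'O' ∧ b = 'O')

theorem checkCharsOk_eq_all (l : List Char) :
    checkCharsOk l = l.all (fun c => c == 'E' || c == 'O') := by
  induction l with
  | nil => rfl
  | cons c rest ih =>
      simp only [checkCharsOk, List.all_cons, ih]
      cases hc : (c == 'E' || c == 'O') <;> simp

theorem checkCharsOk_iff (l : List Char) :
    checkCharsOk l = true ↔ ∀ c ∈ l, c = 'E' ∨ c = 'O' := by
  rw [checkCharsOk_eq_all, List.all_eq_true]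
  simp

theorem checkLoop2_iff (l : List Char) (idxs : List Int) :
    checkLoop2 l idxs = true ↔
      ∀ i ∈ idxs, ¬(PySem.List.pyGet? l i = some 'O' ∧ PySem.List.pyGet? l (i - 1) = some 'O') := by
  induction idxs with
  | nil => simp [checkLoop2]
  | cons i rest ih =>
      simp only [checkLoop2, List.mem_cons]
      split_ifs with h
      · simp only [Bool.and_eq_true, beq_iff_eq] at h
        constructor
        · intro hf; cases hf
        · intro hall; exact absurd h (hall i (Or.inl rfl))
      · simp only [Bool.and_eq_true, beq_iff_eq] at h
        rw [ih]
        constructor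
        · rintro hall j (rfl | hj)
          · exact h
          · exact hall j hj
        · intro hall j hj; exact hall j (Or.inr hj)

theorem checkAltLoop_iff (l : List Char) : ∀ (prev : Option Char),
    checkAltLoop prev l = true ↔
      ((∀ c ∈ l, c = 'E' ∨ c = 'O') ∧ List.IsChain ROk (prev.toList ++ l) ∧
        (prev.toList ++ l).getLast? = some 'O') := by
  induction l with
  | nil =>
      intro prev
      cases prev <;> simp [checkAltLoop]
  | cons c rest ih =>
      intro prev
      simp only [checkAltLoop]
      split_ifs with h
      · simp only [Bool.or_eq_true, Bool.not_eq_eq_eq_not, Bool.not_true,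
          Bool.or_eq_false_iff, beq_eq_false_iff_ne, ne_eq, Bool.and_eq_true, beq_iff_eq] at h
        constructor
        · intro hf; cases hf
        · rintro ⟨hall, hchain, _⟩
          rcases h with ⟨h1, h2⟩ | ⟨h1, h2⟩
          · exact absurd (hall c (List.mem_cons_self ..)) (by tauto)
          · cases prev with
            | none => simp at h2
            | some p =>
              simp only [Option.some.injEq] at h2
              have := (List.isChain_cons_cons.mp hchain).1
              exact this ⟨h2, h1⟩
      · simp only [Bool.or_eq_true, Bool.not_eq_eq_eq_not, Bool.not_true,
          Bool.or_eq_false_iff, beq_eq_false_iff_ne, ne_eq, Bool.and_eq_true, beq_iff_eq,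
          not_or] at h
        rw [ih (some c)]
        simp only [Option.toList, List.cons_append, List.mem_cons, List.nil_append]
        cases prev with
        | none =>
            simp only [List.nil_append]
            constructor
            · rintro ⟨hall, hchain, hlast⟩
              refine ⟨?_, hchain, hlast⟩
              rintro d (rfl | hd)
              · rcases h with ⟨h1, _⟩
                by_cases hE : d = 'E'
                · exact Or.inl hE
                · exact Or.inr (by simpa [hE] using h1)
              · exact hall d hd
            · rintro ⟨hall, hchain, hlast⟩
              exact ⟨fun d hd => hall d (Or.inr hd), hchain, hlast⟩
        | some p =>
            simp only [List.cons_append, List.nil_append]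
            rw [List.isChain_cons_cons]
            constructor
            · rintro ⟨hall, hchain, hlast⟩
              refine ⟨?_, ⟨?_, hchain⟩, ?_⟩
              · rintro d (rfl | hd)
                · rcases h with ⟨h1, _⟩
                  by_cases hE : d = 'E'
                  · exact Or.inl hE
                  · exact Or.inr (by simpa [hE] using h1)
                · exact hall d hd
              · rintro ⟨hp, hc⟩
                rcases h with ⟨_, h2⟩
                exact h2 ⟨hc, by rw [hp]⟩
              · simpa using hlast
            · rintro ⟨hall, ⟨_, hchain⟩, hlast⟩
              exact ⟨fun d hd => hall d (Or.inr hd), hchain, by simpa using hlast⟩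

-- A's index-pair scan says exactly IsChain ROk
theorem loop2_eq_isChain (l : List Char) :
    checkLoop2 l (PySem.List.pyRange 1 (l.length : Int) 1) = true ↔ List.IsChain ROk l := by
  rw [checkLoop2_iff, List.isChain_iff_getElem]
  constructor
  · intro hall i hi
    rintro ⟨h1, h2⟩
    refine hall ((i : Int) + 1) ?_ ?_
    · rw [PySem.List.mem_pyRange_one]; omega
    · constructor
      · rw [show ((i : Int) + 1) = ((i + 1 : Nat) : Int) by push_cast; ring,
          PySem.List.pyGet?_natCast, List.getElem?_eq_getElem hi]
        exact congrArg some h2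
      · rw [show ((i : Int) + 1 - 1) = ((i : Nat) : Int) by omega,
          PySem.List.pyGet?_natCast, List.getElem?_eq_getElem (by omega : i < l.length)]
        exact congrArg some h1
  · intro hchain i hi
    rw [PySem.List.mem_pyRange_one] at hi
    rintro ⟨h1, h2⟩
    have hnat : i = ((i.toNat : Nat) : Int) := by omega
    have hlt : i.toNat < l.length := by omega
    have hlt' : i.toNat - 1 + 1 < l.length := by omega
    refine hchain (i.toNat - 1) hlt' ⟨?_, ?_⟩
    · rw [hnat, show ((i.toNat : Nat) : Int) - 1 = ((i.toNat - 1 : Nat) : Int) by omega,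
        PySem.List.pyGet?_natCast, List.getElem?_eq_getElem (by omega)] at h2
      exact Option.some.inj h2
    · rw [hnat, PySem.List.pyGet?_natCast, List.getElem?_eq_getElem hlt] at h1
      have : l[i.toNat] = 'O' := Option.some.inj h1
      simpa [show i.toNat - 1 + 1 = i.toNat by omega] using this

theorem check_iff (s : String) (h : s.toList ≠ []) :
    check s = true ↔
      ((∀ c ∈ s.toList, c = 'E' ∨ c = 'O') ∧ List.IsChain ROk s.toList ∧
        s.toList.getLast? = some 'O') := by
  unfold check
  rw [PySem.List.pyGet?_neg_one]
  cases hl : s.toList.getLast? with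
  | none => exact absurd (List.getLast?_eq_none_iff.mp hl) h
  | some lastc =>
    by_cases hO : lastc = 'O'
    · subst hO
      simp only [bne_self_eq_false, Bool.false_eq_true, if_false]
      by_cases hc : checkCharsOk s.toList = true
      · simp only [hc, Bool.not_true, Bool.false_eq_true, if_false, PySem.Str.len_eq]
        rw [loop2_eq_isChain]
        rw [checkCharsOk_iff] at hc
        constructor
        · intro hch; exact ⟨hc, hch, trivial⟩
        · rintro ⟨_, hch, _⟩; exact hch
      · have hcf : checkCharsOk s.toList = false := by
          simpa using hc
        simp only [hcf, Bool.not_false, if_true]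
        constructor
        · intro hf; cases hf
        · rintro ⟨hall, _, _⟩
          have ht := (checkCharsOk_iff s.toList).mpr hall
          rw [ht] at hcf
          cases hcf
    · have hbne : (lastc != 'O') = true := by simp [hO]
      simp only [hbne, if_true]
      constructor
      · intro hf; cases hf
      · rintro ⟨_, _, hlast⟩
        exact absurd (Option.some.inj hlast) hO

-- ===== VERDICT (by name: the statement is the Claim_ definition above) =====
theorem check_spec : Claim_equal_check := by
  intro s _ hpre
  unfold Spec_check check_alt
  have hB := checkAltLoop_iff s.toList none
  simp only [Option.toList, List.nil_append] at hB
  have hA := check_iff s hpre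
  rw [Bool.eq_iff_iff, hA, hB]
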